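-- pv_equiv track=rewrite | github.com/rishabhjain02/Data-Structures-And-Algorithms | Hashing/Replicating Substring.py | solve
-- ===== SOURCE A (Python) =====
-- from collections import defaultdict
--
-- def solve(A, B):
--     freq = defaultdict(int)
--
--     for c in B:
--         freq[c] += 1
--
--     # Here we only have to check whether each character of String B has a frequency divisble by A
--     # or not. If any character don't have that so this is invalid(-1)
--     # If all the characters have freq divisible by A, so valid(1)
--     for key in freq:
--         if freq[key] % A != 0:
--             return -1
--
--     return 1
-- ===== SOURCE B (Python) =====
-- def solve(A, B):
--     # Sort-then-scan: equal characters become consecutive runs; check each run length.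
--     def check(s):
--         if not s:
--             return 1
--         run = 1
--         while run < len(s) and s[run] == s[0]:
--             run += 1
--         if run % A != 0:
--             return -1
--         return check(s[run:])
--     return check(sorted(B))
-- ===== Notes on version B (the rewrite author's own statement) =====
-- stated objective: alternative
-- what changed: Replaces the defaultdict frequency tally plus dict-iteration check by sort-then-scan: sort B, walk the sorted list run by run of equal characters, and test each run length for divisibility by A.
import Mathlib
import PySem

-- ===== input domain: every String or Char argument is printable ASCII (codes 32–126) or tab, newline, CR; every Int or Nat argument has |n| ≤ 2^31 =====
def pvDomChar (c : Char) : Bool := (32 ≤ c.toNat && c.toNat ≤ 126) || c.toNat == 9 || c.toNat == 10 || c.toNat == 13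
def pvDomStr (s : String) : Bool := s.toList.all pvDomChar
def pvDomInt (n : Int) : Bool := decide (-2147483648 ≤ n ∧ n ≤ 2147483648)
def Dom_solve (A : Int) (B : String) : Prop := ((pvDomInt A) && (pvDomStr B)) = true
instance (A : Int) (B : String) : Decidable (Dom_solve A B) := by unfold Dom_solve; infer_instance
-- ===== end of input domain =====

-- B replaces A's defaultdict tally + dict-iteration check by sort-then-scan over runs of equal characters (alternative decomposition, not claimed faster).


-- ===== PORT A =====
-- 'for key in freq: if freq[key] % A != 0: return -1' with early return
def solveLoopA (A : Int) (freq : PySem.Dict Char Int) : List Char → Int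
  | [] => 1
  | k :: ks => if PySem.Int.mod (freq.getD k 0) A ≠ 0 then -1 else solveLoopA A freq ks

def solve (A : Int) (B : String) : Int :=
  let freq := B.toList.foldl (fun d c => d.modify c 0 (· + 1)) PySem.Dict.empty
  solveLoopA A freq freq.keys

-- ===== PORT B =====
-- inner 'while run < len(s) and s[run] == s[0]: run += 1' (c is s[0])
def scanRun (s : List Char) (c : Char) (run : Nat) : Nat :=
  if h : run < s.length then
    if s[run] == c then scanRun s c (run + 1) else run
  else run
termination_by s.length - run

theorem le_scanRun (s : List Char) (c : Char) (run : Nat) : run ≤ scanRun s c run := by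
  fun_induction scanRun with
  | case1 run h heq ih => omega
  | case2 => omega
  | case3 => omega

-- the recursive 'check' helper of Source B; s[run:] is PySem.List.slice
def checkSorted (A : Int) (s : List Char) : Int :=
  match hs : s with
  | [] => 1
  | c :: rest =>
    let run := scanRun (c :: rest) c 1
    if PySem.Int.mod (run : Int) A ≠ 0 then -1
    else checkSorted A (PySem.List.slice (c :: rest) (some (run : Int)) none)
termination_by s.length
decreasing_by
  simp [PySem.List.slice_from_natCast]
  have := le_scanRun (c :: rest) c 1
  omega

def solve_alt (A : Int) (B : String) : Int :=
  checkSorted A (PySem.List.sorted B.toList (fun c => c) false)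

-- ===== PRECONDITION & SPEC =====
-- Pre_ excludes A = 0 with nonempty B: there Python's '% A' raises ZeroDivisionError (in both A and B).
def Pre_solve (A : Int) (B : String) : Prop := A ≠ 0 ∨ B = ""
instance (A : Int) (B : String) : Decidable (Pre_solve A B) := by unfold Pre_solve; infer_instance
def pvWitness_solve : Int × String := (2, "abab")

def Spec_solve (A : Int) (B : String) (out : Int) : Prop := out = solve_alt A B
instance (A : Int) (B : String) (out : Int) : Decidable (Spec_solve A B out) := by unfold Spec_solve; infer_instance

-- ===== CLAIM (what is proved, stated in full; the proofs are below) =====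
def Claim_equal_solve : Prop := ∀ (A : Int) (B : String), Dom_solve A B → Pre_solve A B → Spec_solve A B (solve A B)

-- ===== LEMMAS AND PROOFS =====

-- the A-side loop is 'if any key is bad then -1 else 1'
theorem solveLoopA_eq_any (A : Int) (freq : PySem.Dict Char Int) (ks : List Char) :
    solveLoopA A freq ks = if ks.any (fun k => decide (PySem.Int.mod (freq.getD k 0) A ≠ 0)) then -1 else 1 := by
  induction ks with
  | nil => simp [solveLoopA]
  | cons k ks ih =>
    simp only [solveLoopA, List.any_cons, ih]
    by_cases h : PySem.Int.mod (freq.getD k 0) A ≠ 0 <;> simp [h]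

theorem scanRun_spec (s : List Char) (c : Char) (run : Nat) :
    scanRun s c run = run + ((s.drop run).takeWhile (· == c)).length := by
  fun_induction scanRun with
  | case1 run h heq ih =>
    have hd : s.drop run = s[run] :: s.drop (run + 1) := List.drop_eq_getElem_cons h
    rw [ih, hd, List.takeWhile_cons]
    simp [heq]; omega
  | case2 run h heq =>
    have hd : s.drop run = s[run] :: s.drop (run + 1) := List.drop_eq_getElem_cons h
    rw [hd, List.takeWhile_cons]
    simp [heq]
  | case3 run h =>
    have : s.drop run = [] := List.drop_eq_nil_of_le (by omega)
    simp [this]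

-- main B-side lemma: on a sorted list, checkSorted is 'if any char has a bad count then -1 else 1'
-- takeWhile (== c) is all c's; dropWhile of a sorted tail is all > c
theorem takeWhile_beq_mem (c x : Char) (l : List Char) (hx : x ∈ l.takeWhile (· == c)) : x = c := by
  have := List.mem_takeWhile_imp hx
  simpa using this

theorem dropWhile_sorted_gt (c : Char) (l : List Char) (hl : l.Pairwise (· ≤ ·))
    (hc : ∀ x ∈ l, c ≤ x) : ∀ x ∈ l.dropWhile (· == c), c < x := by
  intro x hx
  have hsub : ∀ y ∈ l.dropWhile (· == c), y ∈ l := fun y hy => (List.dropWhile_sublist _).mem hy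
  have hpd : (l.dropWhile (· == c)).Pairwise (· ≤ ·) := hl.sublist (List.dropWhile_sublist _)
  rcases hd : l.dropWhile (· == c) with _ | ⟨h, d'⟩
  · rw [hd] at hx; simp at hx
  · have hhne : ¬ (h == c) = true := by
      have := List.head_dropWhile_not (· == c) (l := l) (by rw [hd]; simp)
      simpa [hd] using this
    have hhne' : h ≠ c := by simpa using hhne
    have hch : c < h := lt_of_le_of_ne (hc h (hsub h (by rw [hd]; simp))) (Ne.symm hhne')
    rw [hd] at hx
    rcases List.mem_cons.mp hx with rfl | hx'
    · exact hch
    · rw [hd] at hpd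
      exact lt_of_lt_of_le hch ((List.pairwise_cons.mp hpd).1 x hx')

theorem checkSorted_eq_any (A : Int) (s : List Char) (hs : s.Pairwise (· ≤ ·)) :
    checkSorted A s = if s.any (fun c => decide (PySem.Int.mod (s.count c : Int) A ≠ 0)) then -1 else 1 := by
  fun_induction checkSorted with
  | case1 => simp
  | case2 c rest run hbad =>
    -- bad run: returns -1, and c itself is a bad character
    have hre : run = 1 + (rest.takeWhile (· == c)).length := by
      show scanRun (c :: rest) c 1 = _
      rw [scanRun_spec]; simp
    rw [hre] at hbad
    have hd := dropWhile_sorted_gt c rest (List.pairwise_cons.mp hs).2 (List.pairwise_cons.mp hs).1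
    have hcount : (c :: rest).count c = 1 + (rest.takeWhile (· == c)).length := by
      have h1 : (rest.takeWhile (· == c)).count c = (rest.takeWhile (· == c)).length :=
        List.count_eq_length.mpr (fun y hy => by simp [takeWhile_beq_mem c y _ hy])
      have h2 : (rest.dropWhile (· == c)).count c = 0 :=
        List.count_eq_zero.mpr (fun hmem => lt_irrefl c (hd c hmem))
      have h3 : rest = rest.takeWhile (· == c) ++ rest.dropWhile (· == c) :=
        (List.takeWhile_append_dropWhile).symm
      rw [List.count_cons_self, show rest.count c = ((rest.takeWhile (· == c)) ++ (rest.dropWhile (· == c))).count c by rw [← h3]]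
      rw [List.count_append, h1, h2]
      omega
    have : (c :: rest).any (fun x => decide (PySem.Int.mod (((c :: rest).count x : Nat) : Int) A ≠ 0)) = true := by
      refine List.any_eq_true.mpr ⟨c, by simp, ?_⟩
      rw [hcount]
      simpa using hbad
    rw [if_pos this]
  | case3 c rest run hbad ih =>
    have hre : run = 1 + (rest.takeWhile (· == c)).length := by
      show scanRun (c :: rest) c 1 = _
      rw [scanRun_spec]; simp
    rw [hre] at hbad ih ⊢
    have hpc := List.pairwise_cons.mp hs
    have hd := dropWhile_sorted_gt c rest hpc.2 hpc.1
    have h3 : rest = rest.takeWhile (· == c) ++ rest.dropWhile (· == c) :=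
      (List.takeWhile_append_dropWhile).symm
    have hslice : PySem.List.slice (c :: rest) (some ((1 + (rest.takeWhile (· == c)).length : Nat) : Int)) none
        = rest.dropWhile (· == c) := by
      rw [PySem.List.slice_from_natCast]
      conv_lhs => rw [show (c :: rest) = c :: (rest.takeWhile (· == c) ++ rest.dropWhile (· == c)) by rw [← h3]]
      rw [show 1 + (rest.takeWhile (· == c)).length = (rest.takeWhile (· == c)).length + 1 by omega,
        List.drop_succ_cons, List.drop_left]
    have hcount : (c :: rest).count c = 1 + (rest.takeWhile (· == c)).length := by
      have h1 : (rest.takeWhile (· == c)).count c = (rest.takeWhile (· == c)).length :=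
        List.count_eq_length.mpr (fun y hy => by simp [takeWhile_beq_mem c y _ hy])
      have h2 : (rest.dropWhile (· == c)).count c = 0 :=
        List.count_eq_zero.mpr (fun hmem => lt_irrefl c (hd c hmem))
      rw [List.count_cons_self, show rest.count c = ((rest.takeWhile (· == c)) ++ (rest.dropWhile (· == c))).count c by rw [← h3]]
      rw [List.count_append, h1, h2]; omega
    have hcx : ∀ x ∈ rest.dropWhile (· == c), (c :: rest).count x = (rest.dropWhile (· == c)).count x := by
      intro x hx
      have hxc : x ≠ c := fun h => lt_irrefl c (h ▸ hd x hx)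
      have hxt : (rest.takeWhile (· == c)).count x = 0 :=
        List.count_eq_zero.mpr (fun hm => hxc (takeWhile_beq_mem c x _ hm))
      have h0 : (c :: rest).count x = rest.count x := by
        simp [List.count_cons, show (c == x) = false from by simpa using (Ne.symm hxc)]
      rw [h0, show rest.count x = ((rest.takeWhile (· == c)) ++ (rest.dropWhile (· == c))).count x by rw [← h3]]
      rw [List.count_append, hxt]; omega
    have hpdrop : (rest.dropWhile (· == c)).Pairwise (· ≤ ·) :=
      hpc.2.sublist (List.dropWhile_sublist _)
    rw [hslice] at ih
    have ih' := ih hpdrop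
    -- rewrite the RHS 'any' over s into f c || any over the dropWhile tail
    have hany : (c :: rest).any (fun x => decide (PySem.Int.mod (((c :: rest).count x : Nat) : Int) A ≠ 0))
        = (rest.dropWhile (· == c)).any (fun x => decide (PySem.Int.mod (((rest.dropWhile (· == c)).count x : Nat) : Int) A ≠ 0)) := by
      rcases Bool.eq_false_or_eq_true ((rest.dropWhile (· == c)).any (fun x => decide (PySem.Int.mod (((rest.dropWhile (· == c)).count x : Nat) : Int) A ≠ 0))) with hb | hb
      · rw [hb]
        obtain ⟨x, hx, hfx⟩ := List.any_eq_true.mp hb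
        refine List.any_eq_true.mpr ⟨x, ?_, ?_⟩
        · exact List.mem_cons_of_mem _ (h3 ▸ List.mem_append.mpr (Or.inr hx))
        · rw [hcx x hx]; exact hfx
      · rw [hb]
        refine List.any_eq_false.mpr ?_
        intro x hx
        rcases List.mem_cons.mp hx with rfl | hx'
        · rw [hcount]; simpa using hbad
        · rcases (List.mem_append.mp (h3 ▸ hx')) with hxt | hxd
          · have := takeWhile_beq_mem c x _ hxt; subst this
            rw [hcount]; simpa using hbad
          · have := List.any_eq_false.mp hb x hxd
            rw [hcx x hxd]
            simpa using this
    rw [hany, hslice]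
    exact ih'

theorem solve_spec : Claim_equal_solve := by
  intro A B _ _
  unfold Spec_solve solve solve_alt
  rw [show B.toList.foldl (fun d c => d.modify c 0 (· + 1)) PySem.Dict.empty = PySem.Dict.counter B.toList from (PySem.Dict.counter_eq_foldl B.toList).symm]
  rw [solveLoopA_eq_any, PySem.Dict.keys_counter]
  have hpair : (PySem.List.sorted B.toList (fun c => c) false).Pairwise (· ≤ ·) := by
    have := PySem.List.sorted_pairwise B.toList (fun c => c)
    simpa using this
  rw [checkSorted_eq_any A _ hpair]
  have hperm : (PySem.List.sorted B.toList (fun c => c) false).Perm B.toList :=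
    PySem.List.sorted_perm B.toList (fun c => c) false
  have hcond : ((PySem.List.sorted B.toList (fun c => c) false).any fun c =>
        decide (PySem.Int.mod ((List.count c (PySem.List.sorted B.toList (fun c => c) false) : Nat) : Int) A ≠ 0))
      = ((PySem.Set.ofList B.toList).any fun k =>
        decide (PySem.Int.mod ((PySem.Dict.counter B.toList).getD k 0) A ≠ 0)) := by
    rw [Bool.eq_iff_iff]
    simp only [List.any_eq_true, decide_eq_true_eq]
    constructor
    · rintro ⟨x, hx, hfx⟩
      refine ⟨x, (PySem.Set.mem_ofList _ _).mpr (hperm.mem_iff.mp hx), ?_⟩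
      rw [PySem.Dict.getD_counter]
      rw [hperm.count_eq] at hfx
      exact hfx
    · rintro ⟨x, hx, hfx⟩
      refine ⟨x, hperm.mem_iff.mpr ((PySem.Set.mem_ofList _ _).mp hx), ?_⟩
      rw [hperm.count_eq]
      rw [PySem.Dict.getD_counter] at hfx
      exact hfx
  rw [hcond]
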